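-- pv_equiv track=rewrite | github.com/logic-star-ai/swt-bench | figures/venn_methods.py | get_shared
-- ===== SOURCE A (Python) =====
-- from itertools import combinations
--
-- def get_shared(sets):
--     IDs = sets.keys()
--     combs = sum([list(map(list, combinations(IDs, i))) for i in range(1, len(IDs) + 1)], [])
--
--     shared = {}
--     for comb in combs:
--         ID = tuple(comb)
--         if len(comb) == 1:
--             shared.update({ID: sets[comb[0]]})
--         else:
--             setlist = [sets[c] for c in comb]
--             u = set.intersection(*setlist)
--             shared.update({ID: u})
--     return shared
-- ===== SOURCE B (Python) =====
-- def get_shared(sets):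
--     # DP over the subset lattice: each combination's intersection is computed
--     # from its prefix's intersection with one extra set (one & per combination).
--     IDs = list(sets)
--     shared = {}
--     level = []
--     rest = IDs
--     while rest:
--         k, rest = rest[0], rest[1:]
--         level.append(((k,), sets[k], rest))
--     for _ in range(len(IDs)):
--         for comb, s, _ in level:
--             shared[comb] = s
--         nxt = []
--         for comb, s, rest in level:
--             while rest:
--                 k, rest = rest[0], rest[1:]
--                 nxt.append((comb + (k,), s & sets[k], rest))
--         level = nxt
--     return shared
-- ===== Notes on version B (the rewrite author's own statement) =====
-- stated objective: alternative
-- what changed: Instead of recomputing each combination's intersection from scratch over all its member sets, B walks the subset lattice level by level, carrying each combination's intersection and its remaining-key suffix, so every new combination costs a single intersection with one added set (a timing run could not confirm a speed-up on its sampled inputs, so none is claimed).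
import Mathlib
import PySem

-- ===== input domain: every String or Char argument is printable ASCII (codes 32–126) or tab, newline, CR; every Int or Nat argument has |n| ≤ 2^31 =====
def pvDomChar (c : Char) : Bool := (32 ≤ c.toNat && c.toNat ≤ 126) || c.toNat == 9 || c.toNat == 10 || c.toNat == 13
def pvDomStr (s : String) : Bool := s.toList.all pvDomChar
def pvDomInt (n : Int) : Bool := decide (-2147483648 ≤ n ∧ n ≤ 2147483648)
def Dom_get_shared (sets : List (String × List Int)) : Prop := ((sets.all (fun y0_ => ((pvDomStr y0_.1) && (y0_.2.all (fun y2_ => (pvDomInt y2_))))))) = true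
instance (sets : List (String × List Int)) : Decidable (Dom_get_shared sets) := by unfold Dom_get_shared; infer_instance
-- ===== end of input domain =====

-- B replaces A's per-combination from-scratch intersection of all member sets by a level-by-level
-- walk of the subset lattice that carries each combination's intersection and extends it with one
-- set at a time (objective: alternative — one intersection per combination instead of one per member set).


-- ===== PORT A =====
def get_shared (sets : List (String × List Int)) : List (List String × List Int) :=
  let d : PySem.Dict String (List Int) := PySem.Dict.mk sets
  let IDs : List String := d.keys
  -- combs = sum([list(map(list, combinations(IDs, i))) for i in range(1, len(IDs) + 1)], [])
  let combs : List (List String) :=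
    ((PySem.List.pyRange 1 (PySem.List.len IDs + 1) 1).map
        (fun i => PySem.List.combinations IDs i.toNat)).foldl (fun acc l => acc ++ l) []
  let shared : PySem.Dict (List String) (List Int) :=
    combs.foldl (fun sh comb =>
      if PySem.List.len comb = 1 then
        -- sets[comb[0]]: comb's entries come from the dict's keys, so the key is present
        sh.insert comb (d.getD (PySem.List.pyGetD comb 0 "") [])
      else
        let setlist := comb.map (fun c => d.getD c [])
        -- set.intersection(*setlist): setlist is nonempty here (len(comb) ≥ 2)
        let u := match setlist with
          | [] => []
          | s0 :: rest => rest.foldl (fun a s => PySem.Set.inter a s) s0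
        sh.insert comb u) PySem.Dict.empty
  shared.items

-- ===== PORT B =====
-- 'while rest: k, rest = rest[0], rest[1:]; level.append(((k,), sets[k], rest))'
def pvInitLevel (d : PySem.Dict String (List Int)) :
    List String → List (List String × List Int × List String)
  | [] => []
  | k :: rest => ([k], d.getD k [], rest) :: pvInitLevel d rest

-- inner 'while rest: k, rest = rest[0], rest[1:]; nxt.append((comb + (k,), s & sets[k], rest))'
def pvExtend (d : PySem.Dict String (List Int)) (comb : List String) (s : List Int) :
    List String → List (List String × List Int × List String)
  | [] => []
  | k :: rest => (comb ++ [k], PySem.Set.inter s (d.getD k []), rest) :: pvExtend d comb s rest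

def get_shared_alt (sets : List (String × List Int)) : List (List String × List Int) :=
  let d : PySem.Dict String (List Int) := PySem.Dict.mk sets
  let IDs : List String := d.keys
  let st :=
    (PySem.List.pyRange 0 (PySem.List.len IDs) 1).foldl
      (fun (st : PySem.Dict (List String) (List Int) × List (List String × List Int × List String)) _ =>
        let sh := st.2.foldl (fun sh t => sh.insert t.1 t.2.1) st.1
        let nxt := st.2.foldl (fun acc t => acc ++ pvExtend d t.1 t.2.1 t.2.2) []
        (sh, nxt))
      (PySem.Dict.empty, pvInitLevel d IDs)
  st.1.items

-- ===== PRECONDITION & SPEC =====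
def Spec_get_shared (sets : List (String × List Int)) (out : List (List String × List Int)) : Prop := out = get_shared_alt sets
instance (sets : List (String × List Int)) (out : List (List String × List Int)) : Decidable (Spec_get_shared sets out) := by unfold Spec_get_shared; infer_instance

-- ===== CLAIM (what is proved, stated in full; the proofs are below) =====
def Claim_equal_get_shared : Prop := ∀ (sets : List (String × List Int)), Dom_get_shared sets → Spec_get_shared sets (get_shared sets)

-- ===== LEMMAS AND PROOFS =====

-- combination/rest pairs: the comb-and-remaining-suffix skeleton of B's levels
def pvExtP (c : List String) : List String → List (List String × List String)
  | [] => []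
  | k :: r => (c ++ [k], r) :: pvExtP c r

def pvStepP (Q : List (List String × List String)) : List (List String × List String) :=
  Q.flatMap (fun p => pvExtP p.1 p.2)

def pvIterP : Nat → List (List String × List String) → List (List String × List String)
  | 0, Q => Q
  | j + 1, Q => pvIterP j (pvStepP Q)

-- intersection value of a combination, folded from a seed
def pvVal (d : PySem.Dict String (List Int)) (s : List Int) (c : List String) : List Int :=
  c.foldl (fun a k => PySem.Set.inter a (d.getD k [])) s

def pvVal1 (d : PySem.Dict String (List Int)) : List String → List Int
  | [] => []
  | c0 :: cs => pvVal d (d.getD c0 []) cs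

def pvAddVal (d : PySem.Dict String (List Int)) (p : List String × List String) :
    List String × List Int × List String :=
  (p.1, pvVal1 d p.1, p.2)

def pvStepT (d : PySem.Dict String (List Int))
    (lv : List (List String × List Int × List String)) :
    List (List String × List Int × List String) :=
  lv.flatMap (fun t => pvExtend d t.1 t.2.1 t.2.2)

-- B's loop, abstracted over the iteration count
def pvLoop (d : PySem.Dict String (List Int)) :
    Nat → PySem.Dict (List String) (List Int) × List (List String × List Int × List String) →
    PySem.Dict (List String) (List Int) × List (List String × List Int × List String)
  | 0, st => st
  | m + 1, st =>
      pvLoop d m (st.2.foldl (fun sh t => sh.insert t.1 t.2.1) st.1,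
                  st.2.foldl (fun acc t => acc ++ pvExtend d t.1 t.2.1 t.2.2) [])

-- the (key, value) insertion sequence B performs over m iterations
def pvFlat (d : PySem.Dict String (List Int)) :
    Nat → List (List String × List Int × List String) → List (List String × List Int)
  | 0, _ => []
  | m + 1, lv => lv.map (fun t => (t.1, t.2.1)) ++ pvFlat d m (pvStepT d lv)

-- A's per-combination value
def pvAval (d : PySem.Dict String (List Int)) (c : List String) : List Int :=
  if PySem.List.len c = 1 then d.getD (PySem.List.pyGetD c 0 "") []
  else
    match c.map (fun k => d.getD k []) with
    | [] => []
    | s0 :: rest => rest.foldl (fun a s => PySem.Set.inter a s) s0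

lemma pvExtend_eq_map (d : PySem.Dict String (List Int)) (c : List String) (s : List Int) :
    ∀ r : List String, pvExtend d c s r =
      (pvExtP [] r).map (fun p => (c ++ p.1, pvVal d s p.1, p.2)) := by
  intro r
  induction r with
  | nil => rfl
  | cons k r ih => simp [pvExtend, pvExtP, ih, pvVal]

lemma pvInitLevel_eq_map (d : PySem.Dict String (List Int)) :
    ∀ r : List String, pvInitLevel d r = (pvExtP [] r).map (pvAddVal d) := by
  intro r
  induction r with
  | nil => rfl
  | cons k r ih => simp [pvInitLevel, pvExtP, ih, pvAddVal, pvVal1, pvVal]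

lemma pvExtP_shift (c : List String) :
    ∀ r : List String, pvExtP c r = (pvExtP [] r).map (fun p => (c ++ p.1, p.2)) := by
  intro r
  induction r with
  | nil => rfl
  | cons k r ih => simp [pvExtP, ih]

lemma pvExtP_shift' (c c' : List String) :
    ∀ r : List String, pvExtP (c ++ c') r = (pvExtP c' r).map (fun p => (c ++ p.1, p.2)) := by
  intro r
  rw [pvExtP_shift (c ++ c') r, pvExtP_shift c' r]
  simp

lemma pvVal1_append (d : PySem.Dict String (List Int)) (c a : List String) (h : c ≠ []) :
    pvVal1 d (c ++ a) = pvVal d (pvVal1 d c) a := by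
  obtain ⟨c0, cs, rfl⟩ := List.exists_cons_of_ne_nil h
  simp [pvVal1, pvVal, List.foldl_append]

lemma pvExtend_val (d : PySem.Dict String (List Int)) (c : List String) (h : c ≠ [])
    (r : List String) :
    pvExtend d c (pvVal1 d c) r = (pvExtP c r).map (pvAddVal d) := by
  rw [pvExtend_eq_map, pvExtP_shift c r]
  simp only [List.map_map]
  refine List.map_congr_left fun p hp => ?_
  simp [pvAddVal, pvVal1_append d c p.1 h]

lemma pvExtP_ne_nil (c : List String) (r : List String) :
    ∀ p ∈ pvExtP c r, p.1 ≠ [] := by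
  induction r with
  | nil => simp [pvExtP]
  | cons k r ih =>
    intro p hp
    rw [pvExtP, List.mem_cons] at hp
    rcases hp with rfl | hm
    · simp
    · exact ih p hm

lemma pvStepP_ne_nil (Q : List (List String × List String)) :
    ∀ p ∈ pvStepP Q, p.1 ≠ [] := by
  intro p hp
  simp only [pvStepP, List.mem_flatMap] at hp
  obtain ⟨q, _, hq⟩ := hp
  exact pvExtP_ne_nil q.1 q.2 p hq

lemma pvStepT_map (d : PySem.Dict String (List Int)) (Q : List (List String × List String))
    (h : ∀ p ∈ Q, p.1 ≠ []) :
    pvStepT d (Q.map (pvAddVal d)) = (pvStepP Q).map (pvAddVal d) := by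
  unfold pvStepT
  induction Q with
  | nil => rfl
  | cons q Q ih =>
    simp only [List.map_cons, List.flatMap_cons, pvStepP] at *
    rw [ih (fun p hp => h p (List.mem_cons_of_mem _ hp))]
    rw [List.map_append]
    congr 1
    exact pvExtend_val d q.1 (h q (List.mem_cons_self)) q.2

lemma pvIterP_nil (j : Nat) : pvIterP j [] = [] := by
  induction j with
  | zero => rfl
  | succ j ih => simpa [pvIterP, pvStepP] using ih

lemma pvIterP_append (j : Nat) :
    ∀ Q1 Q2, pvIterP j (Q1 ++ Q2) = pvIterP j Q1 ++ pvIterP j Q2 := by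
  induction j with
  | zero => intro Q1 Q2; rfl
  | succ j ih => intro Q1 Q2; simp only [pvIterP, pvStepP, List.flatMap_append]; exact ih _ _

lemma pvIterP_map_shift (c : List String) (j : Nat) :
    ∀ Q, pvIterP j (Q.map (fun p => (c ++ p.1, p.2))) =
      (pvIterP j Q).map (fun p => (c ++ p.1, p.2)) := by
  induction j with
  | zero => intro Q; rfl
  | succ j ih =>
    intro Q
    simp only [pvIterP]
    rw [show pvStepP (Q.map (fun p => (c ++ p.1, p.2))) = (pvStepP Q).map (fun p => (c ++ p.1, p.2)) from ?_, ih]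
    simp only [pvStepP, List.flatMap_map, List.map_flatMap]
    refine List.flatMap_congr fun p hp => ?_
    exact pvExtP_shift' c p.1 p.2

lemma pvExtP_fst (r : List String) : (pvExtP [] r).map Prod.fst = r.map (fun k => [k]) := by
  induction r with
  | nil => rfl
  | cons k r ih => simp only [pvExtP, List.map_cons, ih, List.nil_append]

lemma pvIterP_combs (j : Nat) :
    ∀ r : List String, (pvIterP j (pvExtP [] r)).map Prod.fst =
      PySem.List.combinations r (j + 1) := by
  induction j with
  | zero =>
    intro r
    rw [show pvIterP 0 (pvExtP [] r) = pvExtP [] r from rfl, pvExtP_fst, PySem.List.combinations_one]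
  | succ j ihj =>
    intro r
    induction r with
    | nil =>
      simp [pvIterP, pvExtP, pvStepP, pvIterP_nil, PySem.List.combinations_nil_succ]
    | cons x xs ihr =>
      have hsplit : pvExtP ([] : List String) (x :: xs) = [([x], xs)] ++ pvExtP [] xs := by
        simp [pvExtP]
      rw [show pvIterP (j+1) (pvExtP [] (x :: xs)) = pvIterP j (pvStepP (pvExtP [] (x :: xs))) from rfl]
      have hstep : pvStepP (pvExtP [] (x :: xs)) = pvExtP [x] xs ++ pvStepP (pvExtP [] xs) := by
        rw [hsplit]; simp [pvStepP]
      rw [hstep, pvIterP_append]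
      have h1 : pvIterP j (pvExtP [x] xs) = (pvIterP j (pvExtP [] xs)).map (fun p => ([x] ++ p.1, p.2)) := by
        rw [pvExtP_shift [x] xs, pvIterP_map_shift]
      rw [h1, List.map_append, List.map_map]
      have h2 : (pvIterP j (pvExtP [] xs)).map (Prod.fst ∘ fun p => ([x] ++ p.1, p.2)) =
          ((pvIterP j (pvExtP [] xs)).map Prod.fst).map (fun c => x :: c) := by
        simp [Function.comp]
      rw [h2, ihj xs]
      rw [show pvIterP j (pvStepP (pvExtP [] xs)) = pvIterP (j+1) (pvExtP [] xs) from rfl, ihr]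
      rw [PySem.List.combinations_cons_succ]

lemma pvLoop_eq_foldl {α : Type} (d : PySem.Dict String (List Int)) (l : List α) : ∀ st,
    l.foldl
      (fun st _ =>
        (st.2.foldl (fun sh t => sh.insert t.1 t.2.1) st.1,
         st.2.foldl (fun acc t => acc ++ pvExtend d t.1 t.2.1 t.2.2) [])) st =
    pvLoop d l.length st := by
  induction l with
  | nil => intro st; rfl
  | cons a l ih => intro st; simp only [List.foldl_cons, List.length_cons, pvLoop]; exact ih _

lemma pvLoop_dict (d : PySem.Dict String (List Int)) (m : Nat) :
    ∀ sh lv, (pvLoop d m (sh, lv)).1 =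
      (pvFlat d m lv).foldl (fun sh p => sh.insert p.1 p.2) sh := by
  induction m with
  | zero => intro sh lv; rfl
  | succ m ih =>
    intro sh lv
    simp only [pvLoop, pvFlat, List.foldl_append]
    rw [ih]
    congr 1
    · rw [List.foldl_map]
    · rw [PySem.List.foldl_append_eq_flatMap, List.nil_append]; rfl

lemma pvFlat_eq (d : PySem.Dict String (List Int)) (m : Nat) :
    ∀ Q, (∀ p ∈ Q, p.1 ≠ []) →
      pvFlat d m (Q.map (pvAddVal d)) =
        (List.range m).flatMap
          (fun i => ((pvIterP i Q).map Prod.fst).map (fun c => (c, pvVal1 d c))) := by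
  induction m with
  | zero => intro Q h; rfl
  | succ m ih =>
    intro Q h
    simp only [pvFlat]
    rw [show pvStepT d (Q.map (pvAddVal d)) = (pvStepP Q).map (pvAddVal d) from pvStepT_map d Q h]
    rw [ih (pvStepP Q) (pvStepP_ne_nil Q)]
    rw [List.range_succ_eq_map]
    rw [List.flatMap_cons, List.flatMap_map]
    congr 1
    simp [pvAddVal, List.map_map, Function.comp, pvIterP]

lemma pvAval_eq (d : PySem.Dict String (List Int)) (c : List String) (h : c ≠ []) :
    pvAval d c = pvVal1 d c := by
  obtain ⟨c0, cs, rfl⟩ := List.exists_cons_of_ne_nil h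
  cases cs with
  | nil => simp [pvAval, pvVal1, pvVal, PySem.List.len, PySem.List.pyGetD]
  | cons c1 cs' =>
    have hlen : PySem.List.len (c0 :: c1 :: cs') ≠ 1 := by
      simp [PySem.List.len_eq]; omega
    simp only [pvAval, if_neg hlen, List.map_cons, pvVal1, pvVal]
    simp [List.foldl_map]

-- ===== VERDICT (by name: the statement is the Claim_ definition above) =====
theorem get_shared_spec : Claim_equal_get_shared := by
  intro sets _
  show get_shared sets = get_shared_alt sets
  simp only [get_shared, get_shared_alt]
  generalize (PySem.Dict.mk sets : PySem.Dict String (List Int)) = d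
  generalize d.keys = IDs
  -- A side: the combs list is the size-graded combination list
  have e1 : List.foldl (fun acc l => acc ++ l) []
      (List.map (fun i => PySem.List.combinations IDs i.toNat)
        (PySem.List.pyRange 1 (PySem.List.len IDs + 1) 1)) =
      (List.range IDs.length).flatMap (fun k => PySem.List.combinations IDs (k + 1)) := by
    rw [PySem.List.foldl_append_eq_flatten, List.nil_append, PySem.List.len_eq,
      PySem.List.pyRange_one, List.map_map, ← List.flatMap_def]
    simp only [Int.add_sub_cancel, Int.toNat_natCast]
    refine List.flatMap_congr fun k _ => ?_
    simp only [Function.comp_apply]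
    congr 1
    omega
  rw [e1]
  -- A's loop body inserts pvAval
  have e2 : (fun (sh : PySem.Dict (List String) (List Int)) comb =>
      if PySem.List.len comb = 1 then
        sh.insert comb (d.getD (PySem.List.pyGetD comb 0 "") [])
      else
        sh.insert comb
          (match comb.map (fun c => d.getD c []) with
           | [] => []
           | s0 :: rest => rest.foldl (fun a s => PySem.Set.inter a s) s0)) =
      fun sh comb => sh.insert comb (pvAval d comb) := by
    funext sh comb
    unfold pvAval
    split <;> rfl
  rw [e2]
  -- fold over combs with computed values = fold over (key, value) pairs
  have e2b : ∀ L : List (List String),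
      List.foldl (fun sh comb => sh.insert comb (pvAval d comb)) PySem.Dict.empty L =
      List.foldl (fun (sh : PySem.Dict (List String) (List Int)) p => sh.insert p.1 p.2)
        PySem.Dict.empty (L.map (fun c => (c, pvAval d c))) := by
    intro L
    rw [List.foldl_map]
  rw [e2b, List.map_flatMap]
  have e3 : ((List.range IDs.length).flatMap
      (fun k => (PySem.List.combinations IDs (k + 1)).map (fun c => (c, pvAval d c)))) =
      ((List.range IDs.length).flatMap
      (fun k => (PySem.List.combinations IDs (k + 1)).map (fun c => (c, pvVal1 d c)))) := by
    refine List.flatMap_congr fun k _ => ?_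
    refine List.map_congr_left fun c hc => ?_
    have hlen := PySem.List.length_of_mem_combinations hc
    have hne : c ≠ [] := by
      intro h; rw [h] at hlen; simp at hlen
    rw [pvAval_eq d c hne]
  rw [e3]
  -- B side
  rw [pvLoop_eq_foldl]
  have e4 : (PySem.List.pyRange 0 (PySem.List.len IDs) 1).length = IDs.length := by
    rw [PySem.List.len_eq, PySem.List.length_pyRange_one]
    omega
  rw [e4, pvInitLevel_eq_map, pvLoop_dict,
    pvFlat_eq d IDs.length (pvExtP [] IDs) (pvExtP_ne_nil [] IDs)]
  congr 1
  congr 1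
  refine List.flatMap_congr fun i _ => ?_
  rw [pvIterP_combs]
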